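-- pv_equiv track=rewrite | github.com/prathyusha-kamasani/Fabric-SKU-Advisor | fabric_sku_advisor_cli.py | format_hour_ranges
-- ===== SOURCE A (Python) =====
-- def format_hour_ranges(hours):
--     """Convert a list of hours [6,7,8,9,14,15,16] to '06:00–10:00, 14:00–17:00'."""
--     if not hours:
--         return ""
--     hours = sorted(hours)
--     ranges = []
--     start = hours[0]
--     prev = hours[0]
--     for h in hours[1:]:
--         if h == prev + 1:
--             prev = h
--         else:
--             ranges.append(f"{start:02d}:00\u2013{prev+1:02d}:00")
--             start = h
--             prev = h
--     ranges.append(f"{start:02d}:00\u2013{prev+1:02d}:00")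
--     return ", ".join(ranges)
-- ===== SOURCE B (Python) =====
-- def format_hour_ranges(hours):
--     """Convert a list of hours [6,7,8,9,14,15,16] to '06:00–10:00, 14:00–17:00'."""
--     hs = sorted(hours)
--     breaks = [(a, b) for a, b in zip(hs, hs[1:]) if b != a + 1]
--     starts = [b for _, b in breaks]
--     ends = [a for a, _ in breaks]
--     if hs:
--         starts = [hs[0]] + starts
--         ends = ends + [hs[-1]]
--     return ", ".join(f"{a:02d}:00\u2013{b + 1:02d}:00" for a, b in zip(starts, ends))
-- ===== Notes on version B (the rewrite author's own statement) =====
-- stated objective: alternative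
-- what changed: B computes the run boundaries declaratively: it filters the adjacent pairs of the sorted list for breaks (b != a+1), reads the starts list and the ends list off those break pairs (plus first/last element), and zips them into ranges, instead of A's single loop threading start/prev/ranges state.
import Mathlib
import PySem

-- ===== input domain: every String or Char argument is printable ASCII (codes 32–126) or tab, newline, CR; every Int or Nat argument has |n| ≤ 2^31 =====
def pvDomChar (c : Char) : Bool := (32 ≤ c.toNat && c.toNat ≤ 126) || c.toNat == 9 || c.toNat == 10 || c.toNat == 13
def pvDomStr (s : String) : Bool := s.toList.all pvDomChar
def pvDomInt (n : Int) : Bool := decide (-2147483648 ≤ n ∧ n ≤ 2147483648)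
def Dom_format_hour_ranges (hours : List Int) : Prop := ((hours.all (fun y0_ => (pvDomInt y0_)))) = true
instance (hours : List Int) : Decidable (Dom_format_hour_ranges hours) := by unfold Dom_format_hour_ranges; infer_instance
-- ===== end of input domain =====

-- B derives the run boundaries from the adjacent-pair breaks of the sorted list (filter + zip of
-- independent starts/ends lists) instead of A's loop threading start/prev state; objective: alternative.

-- shared formatting helper for f"{a:02d}:00\u2013{b+1:02d}:00".
-- fmt02 is an exact port of f"{n:02d}": only a single nonnegative digit gets a zero pad
-- (any n ≤ -1 or n ≥ 10 already prints with at least two characters).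
def fmt02 (n : Int) : String :=
  if 0 ≤ n ∧ n < 10 then "0" ++ PySem.Int.toStr n else PySem.Int.toStr n

def fmtRange (a b : Int) : String :=
  fmt02 a ++ ":00–" ++ fmt02 (b + 1) ++ ":00"

-- ===== PORT A =====
def format_hour_ranges (hours : List Int) : String :=
  if hours = [] then ""
  else
    let hs := PySem.List.sorted hours (fun x => x) false
    let start := hs.headD 0   -- hours[0]; hs is nonempty here, so headD is exact
    -- for h in hours[1:] over the state (start, prev, ranges)
    let r := hs.tail.foldl
      (fun (st : Int × Int × List String) h =>
        if h = st.2.1 + 1 then (st.1, h, st.2.2)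
        else (h, h, st.2.2 ++ [fmtRange st.1 st.2.1]))
      (start, start, [])
    PySem.Str.join ", " (r.2.2 ++ [fmtRange r.1 r.2.1])

-- ===== PORT B =====
def format_hour_ranges_alt (hours : List Int) : String :=
  let hs := PySem.List.sorted hours (fun x => x) false
  -- breaks = [(a, b) for a, b in zip(hs, hs[1:]) if b != a + 1]  (hs[1:] is hs.tail, slice_from_one)
  let breaks := (hs.zip hs.tail).filter (fun p => decide (p.2 ≠ p.1 + 1))
  let starts0 := breaks.map (fun p => p.2)
  let ends0 := breaks.map (fun p => p.1)
  -- if hs: prepend hs[0] to starts, append hs[-1] to ends (headD/getLastD exact: hs nonempty here)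
  let se := if hs = [] then (starts0, ends0)
            else (hs.headD 0 :: starts0, ends0 ++ [hs.getLastD 0])
  PySem.Str.join ", " ((se.1.zip se.2).map (fun p => fmtRange p.1 p.2))

-- ===== PRECONDITION & SPEC =====
def Spec_format_hour_ranges (hours : List Int) (out : String) : Prop := out = format_hour_ranges_alt hours
instance (hours : List Int) (out : String) : Decidable (Spec_format_hour_ranges hours out) := by unfold Spec_format_hour_ranges; infer_instance

-- ===== CLAIM (what is proved, stated in full; the proofs are below) =====
def Claim_equal_format_hour_ranges : Prop := ∀ (hours : List Int), Dom_format_hour_ranges hours → Spec_format_hour_ranges hours (format_hour_ranges hours)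

-- ===== LEMMAS AND PROOFS =====

-- common characterisation: the range strings produced from state (start, prev) and remaining input
def auxRuns (start prev : Int) : List Int → List String
  | [] => [fmtRange start prev]
  | h :: t => if h = prev + 1 then auxRuns start h t else fmtRange start prev :: auxRuns h h t

-- A's fold computes auxRuns
theorem foldA_eq_auxRuns (t : List Int) : ∀ (start prev : Int) (acc : List String),
    (let r := t.foldl
        (fun (st : Int × Int × List String) h =>
          if h = st.2.1 + 1 then (st.1, h, st.2.2)
          else (h, h, st.2.2 ++ [fmtRange st.1 st.2.1]))
        (start, prev, acc)
     r.2.2 ++ [fmtRange r.1 r.2.1]) = acc ++ auxRuns start prev t := by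
  induction t with
  | nil => intro s p acc; simp [auxRuns]
  | cons h t ih =>
    intro s p acc
    simp only [List.foldl_cons, auxRuns]
    by_cases hc : h = p + 1
    · simp only [hc, ih, if_pos]
    · simp only [if_neg hc, ih, List.append_assoc, List.singleton_append]

-- B's zip of the starts/ends lists computes auxRuns (stated over a head prev and tail t)
theorem zipB_eq_auxRuns (t : List Int) : ∀ (start prev : Int),
    ((start :: (((prev :: t).zip t).filter (fun p => decide (p.2 ≠ p.1 + 1))).map (fun p => p.2)).zip
      ((((prev :: t).zip t).filter (fun p => decide (p.2 ≠ p.1 + 1))).map (fun p => p.1)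
        ++ [(prev :: t).getLastD 0])).map (fun p => fmtRange p.1 p.2)
    = auxRuns start prev t := by
  induction t with
  | nil => intro s p; simp [auxRuns]
  | cons h t ih =>
    intro s p
    have ihs := ih s h
    have ihh := ih h h
    simp only [List.getLastD_cons] at ihs ihh
    by_cases hc : h = p + 1
    · subst hc
      simp only [List.zip_cons_cons, List.filter_cons, List.getLastD_cons, auxRuns]
      simpa using ihs
    · have hb : (decide (h ≠ p + 1)) = true := by simp [hc]
      simp only [List.zip_cons_cons, List.filter_cons, List.getLastD_cons, auxRuns, hb,
        if_true, if_neg hc, List.map_cons, List.cons_append]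
      rw [ihh]

-- ===== VERDICT (by name: the statement is the Claim_ definition above) =====
theorem format_hour_ranges_spec : Claim_equal_format_hour_ranges := by
  intro hours _
  unfold Spec_format_hour_ranges format_hour_ranges format_hour_ranges_alt
  by_cases hnil : hours = []
  · subst hnil
    simp [PySem.List.sorted, PySem.Str.join]
  · simp only [if_neg hnil]
    have hs_ne : PySem.List.sorted hours (fun x => x) false ≠ [] := by
      rw [Ne, PySem.List.sorted_eq_nil_iff]; exact hnil
    cases hsort : PySem.List.sorted hours (fun x => x) false with
    | nil => exact absurd hsort hs_ne
    | cons x rest =>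
      simp only [List.headD_cons, List.tail_cons, if_neg (List.cons_ne_nil x rest)]
      rw [foldA_eq_auxRuns rest x x []]
      rw [zipB_eq_auxRuns rest x x]
      simp
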